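-- pv_equiv track=rewrite | github.com/BotrosHanna-INL/nuc_DataCenters | src/schedule_similar_reactors.py | reactor_on_durations_weeks_approach
-- ===== SOURCE A (Python) =====
-- def reactor_on_durations_weeks_approach(delay_in_weeks, fuel_lifetime_weeks, refuel_period_weeks, levelization_period_weeks ):
--     # Calculate the begining and the end of each fuel cycle start (in weeks)
--     fuel_cycle_start_weeks = delay_in_weeks+1  # initizalition (in weeks). We start at week #1 not week (#0)
--     cycle_num = 0
--     fuel_cycle_start_weeks_list = []
--     fuel_cycle_end_weeks_list = []
--
--     while (fuel_cycle_start_weeks ) <= levelization_period_weeks: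
--
--         fuel_cycle_start_weeks = delay_in_weeks + cycle_num*(fuel_lifetime_weeks+refuel_period_weeks) +1
--         fuel_cycle_end_weeks = fuel_cycle_start_weeks+ fuel_lifetime_weeks -1
--         cycle_num = cycle_num +1
--
--         if fuel_cycle_start_weeks<= levelization_period_weeks:
--             fuel_cycle_start_weeks_list.append(fuel_cycle_start_weeks)
--             fuel_cycle_end_weeks_list.append(fuel_cycle_end_weeks )
--
--     if fuel_cycle_end_weeks_list[-1 ] > levelization_period_weeks:
--         fuel_cycle_end_weeks_list[-1 ]= levelization_period_weeks
--
--     return fuel_cycle_start_weeks_list, fuel_cycle_end_weeks_list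
-- ===== SOURCE B (Python) =====
-- def reactor_on_durations_weeks_approach(delay_in_weeks, fuel_lifetime_weeks, refuel_period_weeks, levelization_period_weeks):
--     period = fuel_lifetime_weeks + refuel_period_weeks
--     n = (levelization_period_weeks - delay_in_weeks - 1) // period + 1
--     starts = [delay_in_weeks + k * period + 1 for k in range(n)]
--     ends = [s + fuel_lifetime_weeks - 1 for s in starts]
--     if ends[-1] > levelization_period_weeks:
--         ends[-1] = levelization_period_weeks
--     return starts, ends
-- ===== Notes on version B (the rewrite author's own statement) =====
-- stated objective: simpler
-- what changed: Replaces A's while-loop that repeatedly recomputes and re-tests each candidate start with a closed-form cycle count n = (levelization - delay - 1)//period + 1 and two list comprehensions, then the same final clamp of the last end week.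
import Mathlib
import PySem

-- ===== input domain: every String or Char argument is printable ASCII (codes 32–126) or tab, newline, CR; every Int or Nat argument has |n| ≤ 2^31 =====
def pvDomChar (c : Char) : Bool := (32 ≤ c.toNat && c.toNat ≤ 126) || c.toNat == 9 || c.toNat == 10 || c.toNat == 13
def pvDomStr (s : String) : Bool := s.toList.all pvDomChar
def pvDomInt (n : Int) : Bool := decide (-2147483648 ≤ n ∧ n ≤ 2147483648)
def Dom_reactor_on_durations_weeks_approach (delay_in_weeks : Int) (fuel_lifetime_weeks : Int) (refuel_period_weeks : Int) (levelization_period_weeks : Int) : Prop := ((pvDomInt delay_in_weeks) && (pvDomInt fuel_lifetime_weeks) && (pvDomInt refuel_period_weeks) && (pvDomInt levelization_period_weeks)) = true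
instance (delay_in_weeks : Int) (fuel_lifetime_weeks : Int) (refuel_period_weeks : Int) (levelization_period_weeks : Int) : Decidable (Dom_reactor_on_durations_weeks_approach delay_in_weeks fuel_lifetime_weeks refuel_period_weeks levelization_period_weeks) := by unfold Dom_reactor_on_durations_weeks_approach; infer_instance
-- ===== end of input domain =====

-- B replaces A's while-loop by a closed-form cycle count plus two comprehensions (objective: simpler).

-- ===== PORT A =====
-- `ends[-1] = levelization` clamp shared verbatim by both Pythons' last lines
def pvClampLast (L : Int) : List Int → List Int
  | [] => []
  | [e] => [if e > L then L else e]
  | e :: e' :: rest => e :: pvClampLast L (e' :: rest)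

-- A's while loop, fuel-guarded (A diverges when the period is ≤ 0; those inputs are outside Pre_)
def pvALoop (d fl rf L : Int) : Nat → Int → Int → List Int → List Int → List Int × List Int
  | 0, _, _, ss, es => (ss, es)
  | fuel+1, s, k, ss, es =>
    if s ≤ L then
      let s' := d + k * (fl + rf) + 1
      let e' := s' + fl - 1
      if s' ≤ L then pvALoop d fl rf L fuel s' (k+1) (ss ++ [s']) (es ++ [e'])
      else pvALoop d fl rf L fuel s' (k+1) ss es
    else (ss, es)

def reactor_on_durations_weeks_approach (delay_in_weeks : Int) (fuel_lifetime_weeks : Int) (refuel_period_weeks : Int) (levelization_period_weeks : Int) : List Int × List Int :=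
  let r := pvALoop delay_in_weeks fuel_lifetime_weeks refuel_period_weeks levelization_period_weeks
            (levelization_period_weeks - delay_in_weeks + 2).toNat (delay_in_weeks + 1) 0 [] []
  (r.1, pvClampLast levelization_period_weeks r.2)

-- ===== PORT B =====
def reactor_on_durations_weeks_approach_alt (delay_in_weeks : Int) (fuel_lifetime_weeks : Int) (refuel_period_weeks : Int) (levelization_period_weeks : Int) : List Int × List Int :=
  let period := fuel_lifetime_weeks + refuel_period_weeks
  let n := PySem.Int.floordiv (levelization_period_weeks - delay_in_weeks - 1) period + 1
  let starts := (PySem.List.pyRange 0 n 1).map (fun k => delay_in_weeks + k * period + 1)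
  -- ends[-1] = levelization clamp: pvClampLast (Python raises IndexError on the empty list, excluded by Pre_)
  let ends := starts.map (fun s => s + fuel_lifetime_weeks - 1)
  (starts, pvClampLast levelization_period_weeks ends)

-- ===== PRECONDITION & SPEC =====
-- Pre_ excludes (i) non-positive period fuel_lifetime+refuel ≤ 0, where A's while loop never terminates,
-- and (ii) delay+1 > levelization, where A raises IndexError indexing [-1] on the empty end list.
def Pre_reactor_on_durations_weeks_approach (delay_in_weeks : Int) (fuel_lifetime_weeks : Int) (refuel_period_weeks : Int) (levelization_period_weeks : Int) : Prop :=
  delay_in_weeks + 1 ≤ levelization_period_weeks ∧ 1 ≤ fuel_lifetime_weeks + refuel_period_weeks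
instance (delay_in_weeks : Int) (fuel_lifetime_weeks : Int) (refuel_period_weeks : Int) (levelization_period_weeks : Int) : Decidable (Pre_reactor_on_durations_weeks_approach delay_in_weeks fuel_lifetime_weeks refuel_period_weeks levelization_period_weeks) := by unfold Pre_reactor_on_durations_weeks_approach; infer_instance
def pvWitness_reactor_on_durations_weeks_approach : Int × Int × Int × Int := (2, 10, 3, 52)


def Spec_reactor_on_durations_weeks_approach (delay_in_weeks : Int) (fuel_lifetime_weeks : Int) (refuel_period_weeks : Int) (levelization_period_weeks : Int) (out : List Int × List Int) : Prop := out = reactor_on_durations_weeks_approach_alt delay_in_weeks fuel_lifetime_weeks refuel_period_weeks levelization_period_weeks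
instance (delay_in_weeks : Int) (fuel_lifetime_weeks : Int) (refuel_period_weeks : Int) (levelization_period_weeks : Int) (out : List Int × List Int) : Decidable (Spec_reactor_on_durations_weeks_approach delay_in_weeks fuel_lifetime_weeks refuel_period_weeks levelization_period_weeks out) := by unfold Spec_reactor_on_durations_weeks_approach; infer_instance

-- ===== CLAIM (what is proved, stated in full; the proofs are below) =====
def Claim_equal_reactor_on_durations_weeks_approach : Prop := ∀ (delay_in_weeks : Int) (fuel_lifetime_weeks : Int) (refuel_period_weeks : Int) (levelization_period_weeks : Int), Dom_reactor_on_durations_weeks_approach delay_in_weeks fuel_lifetime_weeks refuel_period_weeks levelization_period_weeks → Pre_reactor_on_durations_weeks_approach delay_in_weeks fuel_lifetime_weeks refuel_period_weeks levelization_period_weeks → Spec_reactor_on_durations_weeks_approach delay_in_weeks fuel_lifetime_weeks refuel_period_weeks levelization_period_weeks (reactor_on_durations_weeks_approach delay_in_weeks fuel_lifetime_weeks refuel_period_weeks levelization_period_weeks)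

-- ===== LEMMAS AND PROOFS =====

theorem pvALoop_spec (d fl rf L : Int) (hp : 1 ≤ fl + rf) :
    ∀ (c : Nat) (fuel : Nat) (j : Nat) (ss es : List Int),
      (j : Int) + c = PySem.Int.floordiv (L - d - 1) (fl + rf) → c + 2 ≤ fuel →
      pvALoop d fl rf L fuel (d + j * (fl + rf) + 1) (j + 1) ss es =
        (ss ++ (List.range' (j+1) c).map (fun k : Nat => d + (k : Int) * (fl + rf) + 1),
         es ++ (List.range' (j+1) c).map (fun k : Nat => d + (k : Int) * (fl + rf) + 1 + fl - 1)) := by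
  intro c
  induction c with
  | zero =>
    intro fuel j ss es hN hfuel
    obtain ⟨f, rfl⟩ : ∃ f, fuel = f + 2 := ⟨fuel - 2, by omega⟩
    have hpos : (0:Int) < fl + rf := by omega
    have hjle : (j:Int) * (fl + rf) ≤ L - d - 1 :=
      (PySem.Int.le_floordiv_iff_mul_le hpos).1 (by omega)
    have hs'2 : L - d - 1 < ((j:Int) + 1 + 1) * (fl + rf) := by
      have h := (PySem.Int.floordiv_lt_iff_lt_mul (a := L - d - 1) (q := (j:Int)+1) hpos).1 (by omega)
      nlinarith
    have hs'1 : L - d - 1 < ((j:Int) + 1) * (fl + rf) :=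
      (PySem.Int.floordiv_lt_iff_lt_mul hpos).1 (by omega)
    simp only [pvALoop]
    split_ifs with h1 h2 h3 <;> first | (exfalso; linarith) | simp
  | succ c ih =>
    intro fuel j ss es hN hfuel
    obtain ⟨f, rfl⟩ : ∃ f, fuel = f + 1 := ⟨fuel - 1, by omega⟩
    have hpos : (0:Int) < fl + rf := by omega
    have h2 : ((j:Int)+1) * (fl+rf) ≤ L - d - 1 :=
      (PySem.Int.le_floordiv_iff_mul_le hpos).1 (by push_cast at hN ⊢; omega)
    have hexp : ((j:Int)+1)*(fl+rf) = (j:Int)*(fl+rf)+(fl+rf) := by ring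
    have h1 : d + (j:Int)*(fl+rf) + 1 ≤ L := by linarith
    have h2' : d + ((j:Int)+1)*(fl+rf) + 1 ≤ L := by linarith
    simp only [pvALoop, if_pos h1]
    rw [if_pos h2']
    have := ih f (j+1) (ss ++ [d + ((j:Int)+1)*(fl+rf) + 1]) (es ++ [d + ((j:Int)+1)*(fl+rf) + 1 + fl - 1])
      (by push_cast; push_cast at hN; omega) (by omega)
    push_cast at this
    rw [this]
    simp [List.range'_succ]

theorem pvAB_eq (d fl rf L : Int) (h1 : d + 1 ≤ L) (hp : 1 ≤ fl + rf) :
    reactor_on_durations_weeks_approach d fl rf L = reactor_on_durations_weeks_approach_alt d fl rf L := by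
  have hpos : (0:Int) < fl + rf := by omega
  set N := PySem.Int.floordiv (L - d - 1) (fl + rf) with hNdef
  have hN0 : 0 ≤ N := (PySem.Int.le_floordiv_iff_mul_le hpos).2 (by simpa using by omega)
  have hNle : N < L - d := by
    refine (PySem.Int.floordiv_lt_iff_lt_mul hpos).2 ?_
    have : (L - d) * 1 ≤ (L - d) * (fl + rf) := by
      apply mul_le_mul_of_nonneg_left hp (by omega)
    linarith
  obtain ⟨f, hf⟩ : ∃ f, (L - d + 2).toNat = f + 1 := ⟨(L - d + 2).toNat - 1, by omega⟩
  have hstep := pvALoop_spec d fl rf L hp N.toNat f 0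
    [d + (0:Int) * (fl + rf) + 1] [d + (0:Int) * (fl + rf) + 1 + fl - 1]
    (by push_cast; omega) (by omega)
  simp only [reactor_on_durations_weeks_approach, reactor_on_durations_weeks_approach_alt, hf]
  simp only [pvALoop, if_pos (show d + 1 ≤ L by omega)]
  rw [if_pos (show d + (0:Int) * (fl + rf) + 1 ≤ L by simpa using by omega)]
  push_cast at hstep
  simp only [List.nil_append, zero_add]
  rw [hstep]
  dsimp only
  rw [← hNdef]
  have hn1 : (N + 1 - 0).toNat = N.toNat + 1 := by omega
  have hstarts : [d + 0 * (fl + rf) + 1] ++ List.map (fun k : Nat => d + ↑k * (fl + rf) + 1) (List.range' 1 N.toNat)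
      = List.map (fun k => d + k * (fl + rf) + 1) (PySem.List.pyRange 0 (N + 1) 1) := by
    rw [PySem.List.pyRange_one, List.map_map, List.range'_eq_map_range, List.map_map,
        hn1, List.range_succ_eq_map, List.map_cons, List.map_map]
    simp only [List.singleton_append]
    congr 1
    norm_num
    exact fun a _ => Or.inl (by ring)
  have hends : [d + 0 * (fl + rf) + 1 + fl - 1] ++ List.map (fun k : Nat => d + ↑k * (fl + rf) + 1 + fl - 1) (List.range' 1 N.toNat)
      = List.map (fun s => s + fl - 1) (List.map (fun k => d + k * (fl + rf) + 1) (PySem.List.pyRange 0 (N + 1) 1)) := by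
    rw [List.map_map, PySem.List.pyRange_one, List.map_map, List.range'_eq_map_range, List.map_map,
        hn1, List.range_succ_eq_map, List.map_cons, List.map_map]
    simp only [List.singleton_append]
    congr 1
    norm_num
    exact fun a _ => Or.inl (by ring)
  rw [hstarts, hends]

-- ===== VERDICT (by name: the statement is the Claim_ definition above) =====
theorem reactor_on_durations_weeks_approach_spec : Claim_equal_reactor_on_durations_weeks_approach := by
  intro d fl rf L _ hpre
  unfold Spec_reactor_on_durations_weeks_approach
  exact pvAB_eq d fl rf L hpre.1 hpre.2
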